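-- pv_equiv track=rewrite | github.com/shinyaohtani/mail_grep | mail_string_utils.py | sanitize_section
-- ===== SOURCE A (Python) =====
-- def sanitize_section(header_str: str) -> str:
--     sanitized: list[str] = []
--     prev_colon: bool = False
--     for line in header_str.splitlines():
--         if ":" in line:
--             key: str
--             val: str
--             key, val = line.split(":", 1)
--             val = val.replace("\r", " ").replace("\n", " ")
--             sanitized.append(f"{key}:{val}")
--             prev_colon = True
--         else:
--             if prev_colon:
--                 line = line.replace("\r", " ").replace("\n", " ")
--             sanitized.append(line)
--             prev_colon = False
--     return "\n".join(sanitized)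
-- ===== SOURCE B (Python) =====
-- def sanitize_section(header_str: str) -> str:
--     return "\n".join(header_str.splitlines())
-- ===== Notes on version B (the rewrite author's own statement) =====
-- stated objective: simpler
-- what changed: B drops A's dead colon-splitting state machine (splitlines already removes every line-boundary character, so the \r/\n replaces never fire and key+':'+val reconstructs the line) and just rejoins the splitlines output.
import Mathlib
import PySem

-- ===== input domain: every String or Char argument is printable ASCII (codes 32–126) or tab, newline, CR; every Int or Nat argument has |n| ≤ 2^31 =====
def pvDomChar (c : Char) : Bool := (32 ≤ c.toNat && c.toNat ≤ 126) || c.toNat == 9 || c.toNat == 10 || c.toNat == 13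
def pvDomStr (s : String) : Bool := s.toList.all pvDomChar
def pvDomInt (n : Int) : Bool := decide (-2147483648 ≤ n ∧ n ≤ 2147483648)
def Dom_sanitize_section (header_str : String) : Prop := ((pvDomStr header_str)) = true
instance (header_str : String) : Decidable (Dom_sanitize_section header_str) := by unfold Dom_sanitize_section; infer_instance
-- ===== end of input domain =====

-- B replaces A's colon-splitting state machine (dead code: splitlines already strips every
-- line-boundary character and split-then-rejoin is lossless) by rejoining splitlines directly.

-- ===== PORT A =====
-- loop body of A's for-loop; state = (sanitized, prev_colon)
def sanitizeStep (st : List (List Char) × Bool) (line : List Char) : List (List Char) × Bool :=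
  if PySem.Chars.isIn [':'] line then
    -- line.split(":", 1): sep ":" ≠ "" so split never raises; Python unpacks the result into
    -- (key, val) — with ":" in line it has exactly two pieces, so the wildcard arm is unreachable
    match PySem.Chars.splitOnMax line [':'] 1 with
    | [key, val] =>
      let val := PySem.Chars.replace (PySem.Chars.replace val ['\r'] [' ']) ['\n'] [' ']
      (st.1 ++ [key ++ ':' :: val], true)
    | _ => (st.1, st.2)
  else
    let line' := if st.2 then PySem.Chars.replace (PySem.Chars.replace line ['\r'] [' ']) ['\n'] [' '] else line
    (st.1 ++ [line'], false)

def sanitize_section (header_str : String) : String :=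
  String.ofList (PySem.Chars.join ['\n']
    ((PySem.Chars.splitlines header_str.toList).foldl sanitizeStep ([], false)).1)

-- ===== PORT B =====
def sanitize_section_alt (header_str : String) : String :=
  String.ofList (PySem.Chars.join ['\n'] (PySem.Chars.splitlines header_str.toList))

-- ===== PRECONDITION & SPEC =====
def Spec_sanitize_section (header_str : String) (out : String) : Prop := out = sanitize_section_alt header_str
instance (header_str : String) (out : String) : Decidable (Spec_sanitize_section header_str out) := by unfold Spec_sanitize_section; infer_instance

-- ===== CLAIM (what is proved, stated in full; the proofs are below) =====
def Claim_equal_sanitize_section : Prop := ∀ (header_str : String), Dom_sanitize_section header_str → Spec_sanitize_section header_str (sanitize_section header_str)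

-- ===== LEMMAS AND PROOFS =====

-- every line produced by splitlines.go consists of characters the boundary test rejects
theorem pv_go_noB (isB : Char → Bool) :
    ∀ (s cur : List Char) (acc : List (List Char)),
      (∀ l ∈ acc, ∀ c ∈ l, isB c = false) → (∀ c ∈ cur, isB c = false) →
      ∀ l ∈ PySem.Chars.splitlines.go isB s cur acc, ∀ c ∈ l, isB c = false := by
  intro s cur acc
  induction s, cur, acc using PySem.Chars.splitlines.go.induct (isB := isB) with
  | case1 cur acc hemp =>
    intro hacc _ l hl
    rw [show PySem.Chars.splitlines.go isB [] cur acc = acc.reverse from by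
      simp [PySem.Chars.splitlines.go, hemp]] at hl
    rw [List.mem_reverse] at hl
    exact hacc l hl
  | case2 cur acc hemp =>
    intro hacc hcur l hl
    rw [show PySem.Chars.splitlines.go isB [] cur acc = (cur.reverse :: acc).reverse from by
      simp [PySem.Chars.splitlines.go, hemp]] at hl
    rw [List.mem_reverse, List.mem_cons] at hl
    rcases hl with h | h
    · subst h; intro c hc; exact hcur c (List.mem_reverse.mp hc)
    · exact hacc l h
  | case3 rest cur acc ih =>
    intro hacc hcur
    have hacc' : ∀ l ∈ (cur.reverse :: acc), ∀ c ∈ l, isB c = false := by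
      intro l hl
      rcases List.mem_cons.mp hl with h | h
      · subst h; intro c hc; exact hcur c (List.mem_reverse.mp hc)
      · exact hacc l h
    simpa only [PySem.Chars.splitlines.go] using ih hacc' (by simp)
  | case4 c rest cur acc hne hB ih =>
    intro hacc hcur
    have hacc' : ∀ l ∈ (cur.reverse :: acc), ∀ c ∈ l, isB c = false := by
      intro l hl
      rcases List.mem_cons.mp hl with h | h
      · subst h; intro c hc; exact hcur c (List.mem_reverse.mp hc)
      · exact hacc l h
    have hgo : PySem.Chars.splitlines.go isB (c :: rest) cur acc
        = PySem.Chars.splitlines.go isB rest [] (cur.reverse :: acc) := by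
      match c, rest with
      | '\x0d', '\n' :: r => exact (hne r rfl rfl).elim
      | c, [] => simp [PySem.Chars.splitlines.go, hB]
      | c, d :: r =>
        rcases eq_or_ne c '\x0d' with hc | hc
        · rcases eq_or_ne d '\n' with hd | hd
          · exact (hne r hc (by rw [hd])).elim
          · subst hc; simp [PySem.Chars.splitlines.go, hB]
        · simp [PySem.Chars.splitlines.go, hB]
    rw [hgo]
    exact ih hacc' (by simp)
  | case5 c rest cur acc hne hB ih =>
    intro hacc hcur
    have hcur' : ∀ x ∈ (c :: cur), isB x = false := by
      intro x hx
      rcases List.mem_cons.mp hx with h | h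
      · subst h; exact Bool.not_eq_true _ |>.mp hB
      · exact hcur x h
    have hgo : PySem.Chars.splitlines.go isB (c :: rest) cur acc
        = PySem.Chars.splitlines.go isB rest (c :: cur) acc := by
      match c, rest with
      | '\x0d', '\n' :: r => exact (hne r rfl rfl).elim
      | c, [] => simp [PySem.Chars.splitlines.go, hB]
      | c, d :: r =>
        rcases eq_or_ne c '\x0d' with hc | hc
        · rcases eq_or_ne d '\n' with hd | hd
          · exact (hne r hc (by rw [hd])).elim
          · subst hc; simp [PySem.Chars.splitlines.go, hB]
        · simp [PySem.Chars.splitlines.go, hB]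
    rw [hgo]
    exact ih hacc hcur'

-- lines of splitlines contain no '\r' and no '\n'
theorem pv_splitlines_noB (s : List Char) :
    ∀ l ∈ PySem.Chars.splitlines s, '\x0d' ∉ l ∧ '\n' ∉ l := by
  intro l hl
  unfold PySem.Chars.splitlines at hl
  have h := pv_go_noB _ s [] [] (by simp) (by simp) l hl
  constructor
  · intro hc; have := h _ hc; simp at this
  · intro hc; have := h _ hc; simp at this

-- replacing a character that does not occur is the identity
theorem pv_replace_go_id (b : Char) (new : List Char) :
    ∀ (fuel : Nat) (l acc : List Char), b ∉ l →
      PySem.Chars.replace.go [b] new fuel l acc = acc.reverse ++ l := by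
  intro fuel l acc
  induction fuel, l, acc using PySem.Chars.replace.go.induct (old := [b]) (new := new) with
  | case1 l acc => intro _; simp [PySem.Chars.replace.go]
  | case2 t acc ht =>
    intro _
    match t, ht with
    | Nat.succ t, _ => simp [PySem.Chars.replace.go]
  | case3 fuel c t acc hpre ih =>
    intro hb
    exfalso
    apply hb
    have : b = c := by simpa [List.isPrefixOf] using hpre
    simp [this]
  | case4 fuel c t acc hpre ih =>
    intro hb
    have hb' : b ∉ t := fun h => hb (List.mem_cons_of_mem _ h)
    simp [PySem.Chars.replace.go, hpre, ih hb']

theorem pv_replace_id (b : Char) (new l : List Char) (h : b ∉ l) :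
    PySem.Chars.replace l [b] new = l := by
  simpa using pv_replace_go_id b new l.length l [] h

-- with maxsplit exhausted (m = 0) the splitter flushes the remainder
theorem pv_split_go_zero (sep : List Char) (fuel : Nat) (l cur : List Char) (acc : List (List Char)) :
    PySem.Chars.splitOnMax.go sep fuel 0 l cur acc = ((cur.reverse ++ l) :: acc).reverse := by
  match fuel, l with
  | 0, l => simp [PySem.Chars.splitOnMax.go]
  | Nat.succ fuel, [] => simp [PySem.Chars.splitOnMax.go]
  | Nat.succ fuel, c :: rest => simp [PySem.Chars.splitOnMax.go]

-- a one-shot split at the first ':' yields two pieces that rejoin to the input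
theorem pv_split_go_one (acc : List (List Char)) :
    ∀ (fuel : Nat) (l cur : List Char), l.length ≤ fuel → ':' ∈ l →
      ∃ k v, PySem.Chars.splitOnMax.go [':'] fuel 1 l cur acc = acc.reverse ++ [k, v] ∧
        k ++ ':' :: v = cur.reverse ++ l := by
  intro fuel
  induction fuel with
  | zero =>
    intro l cur hlen hmem
    interval_cases hl : l.length
    · rw [List.length_eq_zero_iff.mp hl] at hmem; simp at hmem
  | succ fuel ih =>
    intro l cur hlen hmem
    match l, hmem with
    | c :: rest, hmem =>
      by_cases hc : c = ':'
      · subst hc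
        refine ⟨cur.reverse, rest, ?_, by simp⟩
        have hpre : List.isPrefixOf [':'] (':' :: rest) = true := by simp [List.isPrefixOf]
        simp [PySem.Chars.splitOnMax.go, hpre, pv_split_go_zero]
      · have hmem' : ':' ∈ rest := by
          rcases List.mem_cons.mp hmem with h | h
          · exact absurd h.symm hc
          · exact h
        obtain ⟨k, v, hgo, hjoin⟩ := ih rest (c :: cur) (by simpa using Nat.lt_succ_iff.mp (by simpa using hlen)) hmem'
        refine ⟨k, v, ?_, ?_⟩
        · have hpre : List.isPrefixOf [':'] (c :: rest) = false := by
            simp [List.isPrefixOf]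
            exact fun h => hc h.symm
          simp [PySem.Chars.splitOnMax.go, hpre, hgo]
        · rw [hjoin]; simp
    | [], hmem => simp at hmem

-- on a line containing no '\r'/'\n', A's loop body just appends the line unchanged
theorem pv_step_line (l : List Char) (hr : '\x0d' ∉ l) (hn : '\n' ∉ l)
    (st : List (List Char) × Bool) :
    sanitizeStep st l = (st.1 ++ [l], PySem.Chars.isIn [':'] l) := by
  by_cases hin : PySem.Chars.isIn [':'] l = true
  · have hinf : [':'] <:+: l := (PySem.Chars.isIn_iff_infix _ _).mp hin
    have hmem : ':' ∈ l := (List.singleton_sublist).mp hinf.sublist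
    obtain ⟨k, v, hgo, hjoin⟩ := pv_split_go_one [] (l.length + 1) l [] (by omega) hmem
    simp only [List.reverse_nil, List.nil_append] at hgo hjoin
    have hsplit : PySem.Chars.splitOnMax l [':'] 1 = [k, v] := by
      simp only [PySem.Chars.splitOnMax]
      norm_num
      simpa using hgo
    have hrv : '\x0d' ∉ v := fun h => hr (by rw [← hjoin]; simp [h])
    have hnv : '\n' ∉ v := fun h => hn (by rw [← hjoin]; simp [h])
    simp only [sanitizeStep, hin, if_pos, hsplit]
    rw [pv_replace_id _ _ _ hrv, pv_replace_id _ _ _ hnv]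
    simp [hjoin]
  · simp only [sanitizeStep, hin]
    by_cases hb : st.2
    · simp only [hb, if_pos]
      rw [pv_replace_id _ _ _ hr, pv_replace_id _ _ _ hn]
      simp
    · simp [hb]

-- A's whole loop is an identity fold over the lines
theorem pv_foldl (lines : List (List Char)) :
    ∀ (acc : List (List Char)) (b : Bool),
      (∀ l ∈ lines, '\x0d' ∉ l ∧ '\n' ∉ l) →
      (lines.foldl sanitizeStep (acc, b)).1 = acc ++ lines := by
  induction lines with
  | nil => intro acc b _; simp
  | cons l rest ih =>
    intro acc b h
    have hl := h l (List.mem_cons_self ..)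
    rw [List.foldl_cons, pv_step_line l hl.1 hl.2 (acc, b)]
    rw [ih (acc ++ [l]) _ (fun x hx => h x (List.mem_cons_of_mem _ hx))]
    simp

-- ===== VERDICT (by name: the statement is the Claim_ definition above) =====
theorem sanitize_section_spec : Claim_equal_sanitize_section := by
  intro header_str _
  unfold Spec_sanitize_section sanitize_section sanitize_section_alt
  rw [pv_foldl _ [] false (pv_splitlines_noB _)]
  simp
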